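-- pv_equiv track=rewrite | github.com/Unkn-0-wngb/AI-Email-Sender | email_sender.py | parse_generated_content
-- ===== SOURCE A (Python) =====
-- def parse_generated_content(content: str) -> tuple:
--     """Parse AI-generated content into subject and body"""
--     lines = content.split('\n')
--     subject = ""
--     body_lines = []
--     found_subject = False
--
--     for line in lines:
--         stripped_line = line.strip()
--         if (stripped_line.startswith('Subject:') or stripped_line.startswith('SUBJECT:')) and not found_subject:
--             subject = stripped_line.split(':', 1)[1].strip()
--             found_subject = True
--         else:
--             body_lines.append(line)
--
--     if not subject:
--         subject = "Important Message"
--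
--     body = '\n'.join(body_lines).strip()
--     return subject, body
-- ===== SOURCE B (Python) =====
-- def parse_generated_content(content: str) -> tuple:
--     """Parse AI-generated content into subject and body (locate-then-partition)."""
--     lines = content.split('\n')
--     hit = next(((i, line) for i, line in enumerate(lines)
--                 if line.strip().startswith(('Subject:', 'SUBJECT:'))), None)
--     if hit is None:
--         subject, body_lines = "", lines
--     else:
--         i, line = hit
--         subject = line.strip().split(':', 1)[1].strip()
--         body_lines = lines[:i] + lines[i + 1:]
--     return (subject or "Important Message", '\n'.join(body_lines).strip())
-- ===== Notes on version B (the rewrite author's own statement) =====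
-- stated objective: simpler
-- what changed: Replaces the accumulate-as-you-scan loop with flag state by locating the first subject line via next(enumerate(...)) and partitioning the list around it with slices.
import Mathlib
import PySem

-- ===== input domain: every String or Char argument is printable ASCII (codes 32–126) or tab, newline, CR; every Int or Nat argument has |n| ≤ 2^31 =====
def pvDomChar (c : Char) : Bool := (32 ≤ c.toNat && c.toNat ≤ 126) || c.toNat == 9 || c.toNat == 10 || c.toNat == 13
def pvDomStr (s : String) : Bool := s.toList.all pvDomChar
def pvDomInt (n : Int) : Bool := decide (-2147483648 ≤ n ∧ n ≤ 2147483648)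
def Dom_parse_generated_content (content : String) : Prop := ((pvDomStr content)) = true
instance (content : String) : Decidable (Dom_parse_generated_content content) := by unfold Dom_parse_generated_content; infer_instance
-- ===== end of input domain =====

-- B replaces A's accumulate-as-you-scan loop (subject/body/flag state) by locating the
-- first subject line and partitioning the list around it with slices (objective: simpler).

-- shared transliterations of the Python subexpressions
-- "line.strip().startswith(('Subject:', 'SUBJECT:'))"
def pvP (line : String) : Bool :=
  PySem.Str.startswith (PySem.Str.strip line) "Subject:" ||
  PySem.Str.startswith (PySem.Str.strip line) "SUBJECT:"
-- "line.strip().split(':', 1)[1].strip()" ([1] never raises: the stripped line contains ':')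
def pvSubj (line : String) : String :=
  PySem.Str.strip (((PySem.Str.splitMax? (PySem.Str.strip line) ":" 1).getD []).getD 1 "")

-- ===== PORT A =====
def pvStepA (st : String × List String × Bool) (line : String) : String × List String × Bool :=
  if pvP line && !st.2.2 then (pvSubj line, st.2.1, true)
  else (st.1, st.2.1 ++ [line], st.2.2)

def parse_generated_content (content : String) : String × String :=
  let lines := (PySem.Str.split? content "\n").getD []
  let fin := lines.foldl pvStepA ("", [], false)
  let subject := if fin.1 = "" then "Important Message" else fin.1
  (subject, PySem.Str.strip (PySem.Str.join "\n" fin.2.1))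

-- ===== PORT B =====
def parse_generated_content_alt (content : String) : String × String :=
  let lines := (PySem.Str.split? content "\n").getD []
  let sb : String × List String :=
    match (PySem.List.enumerate lines 0).find? (fun il => pvP il.2) with
    | none => ("", lines)
    | some (i, line) =>
        (pvSubj line, PySem.List.slice lines none (some i) ++ PySem.List.slice lines (some (i + 1)) none)
  ((if sb.1 = "" then "Important Message" else sb.1), PySem.Str.strip (PySem.Str.join "\n" sb.2))

-- ===== PRECONDITION & SPEC =====
def Spec_parse_generated_content (content : String) (out : String × String) : Prop := out = parse_generated_content_alt content
instance (content : String) (out : String × String) : Decidable (Spec_parse_generated_content content out) := by unfold Spec_parse_generated_content; infer_instance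

-- ===== CLAIM (what is proved, stated in full; the proofs are below) =====
def Claim_equal_parse_generated_content : Prop := ∀ (content : String), Dom_parse_generated_content content → Spec_parse_generated_content content (parse_generated_content content)

-- ===== LEMMAS AND PROOFS =====

-- first matching line as (prefix, line, suffix); proof-only characterisation
def pvLocate : List String → Option (List String × String × List String)
  | [] => none
  | x :: ls =>
      if pvP x then some ([], x, ls)
      else (pvLocate ls).map (fun pls => (x :: pls.1, pls.2.1, pls.2.2))

lemma pvStepA_found (ls : List String) (s : String) (acc : List String) :
    ls.foldl pvStepA (s, acc, true) = (s, acc ++ ls, true) := by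
  induction ls generalizing acc with
  | nil => simp
  | cons x ls ih =>
      simp [List.foldl_cons, pvStepA, ih]

lemma pvLoopA_eq (ls : List String) (acc : List String) :
    ls.foldl pvStepA ("", acc, false) =
      match pvLocate ls with
      | none => ("", acc ++ ls, false)
      | some (pre, l, suf) => (pvSubj l, acc ++ pre ++ suf, true) := by
  induction ls generalizing acc with
  | nil => simp [pvLocate]
  | cons x ls ih =>
      rw [List.foldl_cons]
      by_cases hx : pvP x = true
      · simp [pvStepA, hx, pvLocate, pvStepA_found]
      · have hx' : pvP x = false := by simpa using hx
        rw [show pvStepA ("", acc, false) x = ("", acc ++ [x], false) by simp [pvStepA, hx']]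
        rw [ih (acc ++ [x])]
        simp only [pvLocate, hx', Bool.false_eq_true, if_false]
        cases h : pvLocate ls with
        | none => simp
        | some pls =>
            obtain ⟨pre, l, suf⟩ := pls
            simp

lemma pvFind_enum (ls : List String) (n : Nat) :
    (PySem.List.enumerate ls (n : Int)).find? (fun il => pvP il.2) =
      (pvLocate ls).map (fun pls => (((n + pls.1.length : Nat) : Int), pls.2.1)) := by
  induction ls generalizing n with
  | nil => simp [PySem.List.enumerate_nil, pvLocate]
  | cons x ls ih =>
      rw [PySem.List.enumerate_cons]
      by_cases hx : pvP x = true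
      · simp [hx, pvLocate]
      · rw [show ((n : Int) + 1) = ((n + 1 : Nat) : Int) by push_cast; ring]
        simp only [List.find?_cons, hx]
        rw [ih (n + 1)]
        cases h : pvLocate ls with
        | none => simp [pvLocate, hx, h]
        | some pls =>
            obtain ⟨pre, l, suf⟩ := pls
            simp only [pvLocate, hx, Bool.false_eq_true, if_false, h, Option.map_some]
            congr 1
            simp
            ring

lemma pvLocate_decomp (ls pre suf : List String) (l : String) :
    pvLocate ls = some (pre, l, suf) → ls = pre ++ l :: suf := by
  induction ls generalizing pre with
  | nil => simp [pvLocate]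
  | cons x ls ih =>
      by_cases hx : pvP x = true
      · simp only [pvLocate, hx, if_true, Option.some.injEq]
        rintro ⟨rfl, rfl, rfl⟩
        simp
      · simp only [pvLocate, hx, Bool.false_eq_true, if_false]
        cases h : pvLocate ls with
        | none => simp
        | some pls =>
            obtain ⟨p, m, s⟩ := pls
            simp only [Option.map_some, Option.some.injEq]
            rintro ⟨rfl, rfl, rfl⟩
            simpa using congrArg (x :: ·) (ih p (by simp [h]))

-- ===== VERDICT (by name: the statement is the Claim_ definition above) =====
theorem parse_generated_content_spec : Claim_equal_parse_generated_content := by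
  intro content _
  unfold Spec_parse_generated_content parse_generated_content parse_generated_content_alt
  dsimp only
  set lines := (PySem.Str.split? content "\n").getD [] with hl
  rw [pvLoopA_eq lines []]
  rw [show (0 : Int) = ((0 : Nat) : Int) by simp, pvFind_enum lines 0]
  cases h : pvLocate lines with
  | none => simp
  | some pls =>
      obtain ⟨pre, l, suf⟩ := pls
      have hdec := pvLocate_decomp lines pre suf l h
      simp only [Option.map_some, Nat.zero_add]
      rw [PySem.List.slice_to lines (Int.natCast_nonneg pre.length),
          PySem.List.slice_from lines (by positivity : (0:Int) ≤ (pre.length : Int) + 1)]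
      have h1 : lines.take pre.length = pre := by
        rw [hdec]; exact List.take_left
      have h2 : lines.drop (pre.length + 1) = suf := by
        rw [hdec, show pre ++ l :: suf = (pre ++ [l]) ++ suf by simp]
        exact List.drop_left' (by simp)
      simp [h1, h2]
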